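-- pv_equiv track=rewrite | github.com/Retrovillate/Segundo_Ejercicio_Habi | ordernar_bloques.py | dividir_en_bloques
-- ===== SOURCE A (Python) =====
-- from typing import List
--
-- def dividir_en_bloques(arreglo: List[int]) -> List[List[int]]:
--     """
--     Divide el arreglo en bloques usando cero como separador.
--     Ceros consecutivos generan bloques vacíos, pero luego
--     se colapsan en una sola 'x' durante el procesamiento.
--     """
--     bloques, bloque_actual = [], []
--     for numero in arreglo:
--         if numero == 0:
--             bloques.append(bloque_actual)
--             bloque_actual = []
--         else:
--             bloque_actual.append(numero)
--     # agregar el último bloque (aunque sea vacío)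
--     bloques.append(bloque_actual)
--     return bloques
-- ===== SOURCE B (Python) =====
-- from typing import List
--
-- def dividir_en_bloques(arreglo: List[int]) -> List[List[int]]:
--     """Split using zero-index boundaries and slicing instead of an accumulator loop."""
--     ceros = [i for i, v in enumerate(arreglo) if v == 0]
--     bloques = []
--     prev = -1
--     for z in ceros:
--         bloques.append(arreglo[prev + 1:z])
--         prev = z
--     bloques.append(arreglo[prev + 1:])
--     return bloques
-- ===== Notes on version B (the rewrite author's own statement) =====
-- stated objective: alternative
-- what changed: B first collects the indices of all zeros, then builds each block by slicing between consecutive zero boundaries (with -1 and len sentinels), instead of A's single pass growing a current-block accumulator.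
import Mathlib
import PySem

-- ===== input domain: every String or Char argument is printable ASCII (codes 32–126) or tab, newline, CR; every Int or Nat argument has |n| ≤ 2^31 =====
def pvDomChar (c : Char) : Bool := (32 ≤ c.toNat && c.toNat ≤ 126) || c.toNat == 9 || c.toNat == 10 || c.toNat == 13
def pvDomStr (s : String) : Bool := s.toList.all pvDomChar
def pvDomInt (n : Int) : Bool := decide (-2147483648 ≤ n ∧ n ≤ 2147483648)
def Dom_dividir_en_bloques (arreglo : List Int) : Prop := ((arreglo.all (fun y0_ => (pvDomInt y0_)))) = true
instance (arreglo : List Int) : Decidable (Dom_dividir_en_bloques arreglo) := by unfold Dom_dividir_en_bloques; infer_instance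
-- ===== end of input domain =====

-- B splits by slicing between precomputed zero indices instead of A's accumulator pass; objective: alternative decomposition (same cost).

-- ===== PORT A =====
def dividir_en_bloques (arreglo : List Int) : List (List Int) :=
  let st := arreglo.foldl
    (fun (st : List (List Int) × List Int) numero =>
      if numero = 0 then (st.1 ++ [st.2], ([] : List Int))
      else (st.1, st.2 ++ [numero]))
    ([], [])
  st.1 ++ [st.2]

-- ===== PORT B =====
def dividir_en_bloques_alt (arreglo : List Int) : List (List Int) :=
  let ceros : List Int :=
    (PySem.List.enumerate arreglo 0).filterMap (fun p => if p.2 = 0 then some p.1 else none)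
  let st := ceros.foldl
    (fun (st : List (List Int) × Int) z =>
      (st.1 ++ [PySem.List.slice arreglo (some (st.2 + 1)) (some z)], z))
    ([], -1)
  st.1 ++ [PySem.List.slice arreglo (some (st.2 + 1)) none]

-- ===== PRECONDITION & SPEC =====
def Spec_dividir_en_bloques (arreglo : List Int) (out : List (List Int)) : Prop := out = dividir_en_bloques_alt arreglo
instance (arreglo : List Int) (out : List (List Int)) : Decidable (Spec_dividir_en_bloques arreglo out) := by unfold Spec_dividir_en_bloques; infer_instance

-- ===== CLAIM (what is proved, stated in full; the proofs are below) =====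
def Claim_equal_dividir_en_bloques : Prop := ∀ (arreglo : List Int), Dom_dividir_en_bloques arreglo → Spec_dividir_en_bloques arreglo (dividir_en_bloques arreglo)

-- ===== LEMMAS AND PROOFS =====

/-- Reference recursive specification of the block split. -/
def pvBlocks : List Int → List (List Int)
  | [] => [[]]
  | x :: L =>
    if x = 0 then [] :: pvBlocks L
    else
      match pvBlocks L with
      | b :: t => (x :: b) :: t
      | [] => [[x]]

lemma pvBlocks_ne_nil (L : List Int) : pvBlocks L ≠ [] := by
  cases L with
  | nil => simp [pvBlocks]
  | cons x L =>
    simp only [pvBlocks]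
    split
    · simp
    · split <;> simp

/-- Head-extension helper used to characterise A's loop. -/
def pvConsHead (cur : List Int) : List (List Int) → List (List Int)
  | b :: t => (cur ++ b) :: t
  | [] => [cur]

def pvStepA (st : List (List Int) × List Int) (numero : Int) : List (List Int) × List Int :=
  if numero = 0 then (st.1 ++ [st.2], ([] : List Int)) else (st.1, st.2 ++ [numero])

lemma dividir_A_loop (L : List Int) : ∀ (bs : List (List Int)) (cur : List Int),
    (L.foldl pvStepA (bs, cur)).1 ++ [(L.foldl pvStepA (bs, cur)).2]
      = bs ++ pvConsHead cur (pvBlocks L) := by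
  induction L with
  | nil => intro bs cur; simp [pvConsHead, pvBlocks]
  | cons x L ih =>
    intro bs cur
    by_cases hx : x = 0
    · simp only [List.foldl_cons, pvStepA, hx]
      rw [ih]
      cases hB : pvBlocks L with
      | nil => exact absurd hB (pvBlocks_ne_nil L)
      | cons b t => simp [pvConsHead, pvBlocks, hB]
    · simp only [List.foldl_cons, pvStepA, if_neg hx]
      rw [ih]
      cases hB : pvBlocks L with
      | nil => exact absurd hB (pvBlocks_ne_nil L)
      | cons b t => simp [pvConsHead, pvBlocks, hx, hB]

lemma dividir_A_eq_blocks (L : List Int) : dividir_en_bloques L = pvBlocks L := by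
  have h := dividir_A_loop L [] []
  have h2 : pvConsHead [] (pvBlocks L) = pvBlocks L := by
    cases hB : pvBlocks L with
    | nil => exact absurd hB (pvBlocks_ne_nil L)
    | cons b t => simp [pvConsHead]
  rw [h2] at h
  simpa [dividir_en_bloques, pvStepA] using h

/-- Zero positions of `L`, counted from offset `s`. -/
def pvZeros (L : List Int) (s : Nat) : List Nat :=
  match L with
  | [] => []
  | x :: L => (if x = 0 then [s] else []) ++ pvZeros L (s + 1)

lemma pvZeros_shift (L : List Int) : ∀ s : Nat, pvZeros L (s + 1) = (pvZeros L s).map (· + 1) := by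
  induction L with
  | nil => intro s; simp [pvZeros]
  | cons x L ih => intro s; by_cases hx : x = 0 <;> simp [pvZeros, hx, ih]

lemma ceros_eq_pvZeros (L : List Int) : ∀ s : Nat,
    (PySem.List.enumerate L (s : Int)).filterMap (fun p => if p.2 = 0 then some p.1 else none)
      = (pvZeros L s).map (Nat.cast : Nat → Int) := by
  induction L with
  | nil => intro s; simp [PySem.List.enumerate_nil, pvZeros]
  | cons x L ih =>
    intro s
    rw [PySem.List.enumerate_cons]
    have hcast : ((s : Int) + 1) = ((s + 1 : Nat) : Int) := by push_cast; ring
    rw [hcast]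
    by_cases hx : x = 0
    · have hf : (fun (p : Int × Int) => if p.2 = 0 then some p.1 else none) ((s : Int), x)
          = some (s : Int) := by simp [hx]
      simp only [List.filterMap_cons, hf]
      rw [ih (s + 1)]
      have hz : pvZeros (x :: L) s = s :: pvZeros L (s + 1) := by simp [pvZeros, hx]
      rw [hz, List.map_cons]
    · have hf : (fun (p : Int × Int) => if p.2 = 0 then some p.1 else none) ((s : Int), x)
          = none := by simp [hx]
      simp only [List.filterMap_cons, hf]
      rw [ih (s + 1)]
      have hz : pvZeros (x :: L) s = pvZeros L (s + 1) := by simp [pvZeros, hx]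
      rw [hz]

/-- Slice-based block construction, with Nat boundaries (drop/take form). -/
def pvGo (L : List Int) : List Nat → Nat → List (List Int)
  | [], s => [L.drop s]
  | z :: zs, s => (L.drop s).take (z - s) :: pvGo L zs (z + 1)

lemma pvGo_shift (x : Int) (L : List Int) : ∀ (zs : List Nat) (s : Nat),
    pvGo (x :: L) (zs.map (· + 1)) (s + 1) = pvGo L zs s := by
  intro zs
  induction zs with
  | nil => intro s; simp [pvGo]
  | cons z zs ih => intro s; simp [pvGo, ih, Nat.add_sub_add_right]

lemma pvZeros_nil_blocks (L : List Int) (h : pvZeros L 0 = []) : pvBlocks L = [L] := by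
  induction L with
  | nil => simp [pvBlocks]
  | cons x L ih =>
    by_cases hx : x = 0
    · rw [pvZeros] at h; simp [hx] at h
    · rw [pvZeros] at h; simp only [hx, if_false, List.nil_append] at h
      rw [pvZeros_shift] at h
      simp only [List.map_eq_nil_iff] at h
      simp [pvBlocks, hx, ih h]

lemma pvGo_eq_blocks (L : List Int) : pvGo L (pvZeros L 0) 0 = pvBlocks L := by
  induction L with
  | nil => simp [pvGo, pvZeros, pvBlocks]
  | cons x L ih =>
    by_cases hx : x = 0
    · have h1 : pvZeros (x :: L) 0 = 0 :: (pvZeros L 0).map (· + 1) := by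
        simp [pvZeros, hx, pvZeros_shift]
      rw [h1]
      show (((x :: L).drop 0).take 0) :: pvGo (x :: L) ((pvZeros L 0).map (· + 1)) (0 + 1)
          = pvBlocks (x :: L)
      rw [pvGo_shift x L (pvZeros L 0) 0, ih]
      simp [pvBlocks, hx]
    · have h1 : pvZeros (x :: L) 0 = (pvZeros L 0).map (· + 1) := by
        simp [pvZeros, hx, pvZeros_shift]
      rw [h1]
      cases hz : pvZeros L 0 with
      | nil =>
        simp only [List.map_nil]
        simp [pvGo, pvBlocks, hx, pvZeros_nil_blocks L hz]
      | cons z zs =>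
        have hIH : pvBlocks L = (L.drop 0).take z :: pvGo L zs (z + 1) := by
          rw [← ih, hz]; rfl
        simp only [List.map_cons, pvGo, List.drop_zero, Nat.sub_zero]
        have hshift : pvGo (x :: L) (zs.map (· + 1)) (z + 1 + 1) = pvGo L zs (z + 1) :=
          pvGo_shift x L zs (z + 1)
        rw [hshift]
        simp [pvBlocks, hx, hIH, List.take_succ_cons]

def pvStepB (L : List Int) (st : List (List Int) × Int) (z : Int) : List (List Int) × Int :=
  (st.1 ++ [PySem.List.slice L (some (st.2 + 1)) (some z)], z)

lemma dividir_B_loop (L : List Int) : ∀ (zs : List Nat) (res : List (List Int)) (s : Nat),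
    ((zs.map (Nat.cast : Nat → Int)).foldl (pvStepB L) (res, (s : Int) - 1)).1
        ++ [PySem.List.slice L
              (some (((zs.map (Nat.cast : Nat → Int)).foldl (pvStepB L) (res, (s : Int) - 1)).2 + 1))
              none]
      = res ++ pvGo L zs s := by
  intro zs
  induction zs with
  | nil =>
    intro res s
    have h1 : (s : Int) - 1 + 1 = (s : Int) := by ring
    simp only [List.map_nil, List.foldl_nil, h1, PySem.List.slice_from_natCast]
    simp [pvGo]
  | cons z zs ih =>
    intro res s
    have h1 : (s : Int) - 1 + 1 = (s : Int) := by ring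
    simp only [List.map_cons, List.foldl_cons, pvStepB, h1]
    rw [PySem.List.slice_natCast]
    have h2 : (z : Int) = ((z + 1 : Nat) : Int) - 1 := by push_cast; ring
    rw [h2]
    rw [ih (res ++ [(L.drop s).take (z - s)]) (z + 1)]
    simp [pvGo]

lemma dividir_B_eq_blocks (L : List Int) : dividir_en_bloques_alt L = pvBlocks L := by
  have hc := ceros_eq_pvZeros L 0
  have hl := dividir_B_loop L (pvZeros L 0) [] 0
  have h0 : ((0 : Nat) : Int) - 1 = -1 := by norm_num
  rw [h0] at hl
  simp only [Nat.cast_zero] at hc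
  rw [dividir_en_bloques_alt]
  simp only [hc]
  have hstep : (fun (st : List (List Int) × Int) z =>
      (st.1 ++ [PySem.List.slice L (some (st.2 + 1)) (some z)], z)) = pvStepB L := rfl
  rw [hstep]
  rw [List.nil_append] at hl
  rw [← pvGo_eq_blocks L]
  exact hl

-- ===== VERDICT (by name: the statement is the Claim_ definition above) =====
theorem dividir_en_bloques_spec : Claim_equal_dividir_en_bloques := by
  intro arreglo _
  unfold Spec_dividir_en_bloques
  rw [dividir_A_eq_blocks, dividir_B_eq_blocks]
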